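-- pv_equiv track=rewrite | github.com/nayuki/MamIRC | python/generate-connection-stats.py | group_digits
-- ===== SOURCE A (Python) =====
-- def group_digits(n):
-- 	temp = str(n)
-- 	result = ""
-- 	end = len(temp)
-- 	while end > 0:
-- 		start = max(end - 3, 0)
-- 		result = "<span>{}</span>".format(temp[start : end]) + result
-- 		end = start
-- 	return result
-- ===== SOURCE B (Python) =====
-- def group_digits(n):
--     s = str(n)
--     first = len(s) % 3
--     parts = []
--     if first:
--         parts.append(s[:first])
--     for i in range(first, len(s), 3):
--         parts.append(s[i:i + 3])
--     return ''.join('<span>{}</span>'.format(p) for p in parts)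
-- ===== Notes on version B (the rewrite author's own statement) =====
-- stated objective: alternative
-- what changed: B scans the digit string left-to-right with a precomputed leading-group offset (len % 3), collecting the parts in a list and joining once, instead of A's right-to-left while loop that repeatedly prepends to the result string.
import Mathlib
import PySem

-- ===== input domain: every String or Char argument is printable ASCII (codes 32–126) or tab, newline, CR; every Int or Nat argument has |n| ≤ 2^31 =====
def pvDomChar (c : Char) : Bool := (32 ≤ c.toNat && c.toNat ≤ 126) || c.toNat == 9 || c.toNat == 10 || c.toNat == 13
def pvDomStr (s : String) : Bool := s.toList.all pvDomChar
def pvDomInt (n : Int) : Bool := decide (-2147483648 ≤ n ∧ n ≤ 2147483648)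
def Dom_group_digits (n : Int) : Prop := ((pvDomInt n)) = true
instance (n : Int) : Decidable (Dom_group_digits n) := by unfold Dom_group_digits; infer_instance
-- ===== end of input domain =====

-- B groups str(n) left-to-right using a precomputed leading-group offset (len % 3) and one final
-- join, instead of A's right-to-left while loop that prepends to the result string (objective: alternative).

-- '<span>{}</span>'.format(p), shared by both ports
def wrapSpan (p : List Char) : List Char := "<span>".toList ++ p ++ "</span>".toList

-- ===== PORT A =====
-- while end > 0: start = max(end-3, 0); result = wrap(temp[start:end]) + result; end = start
-- (end stays ≥ 0 in Python, so it is carried as a Nat; 'e - 3' is Nat subtraction = max(e-3,0))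
def groupA_loop (temp : List Char) (e : Nat) (result : List Char) : List Char :=
  if 0 < e then
    let start := e - 3
    groupA_loop temp start
      (wrapSpan (PySem.List.slice temp (some (start : Int)) (some (e : Int))) ++ result)
  else result
termination_by e
decreasing_by omega

def group_digits (n : Int) : String :=
  let temp := PySem.Int.toChars n
  String.ofList (groupA_loop temp temp.length [])

-- ===== PORT B =====
def group_digits_alt (n : Int) : String :=
  let s := PySem.Int.toChars n
  let first := s.length % 3
  let head := if first ≠ 0 then [PySem.List.slice s none (some (first : Int))] else []
  let parts := (PySem.List.pyRange (first : Int) (s.length : Int) 3).foldl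
      (fun acc i => acc ++ [PySem.List.slice s (some i) (some (i + 3))]) head
  String.ofList ((parts.map wrapSpan).flatten)

-- ===== PRECONDITION & SPEC =====
def Spec_group_digits (n : Int) (out : String) : Prop := out = group_digits_alt n
instance (n : Int) (out : String) : Decidable (Spec_group_digits n out) := by unfold Spec_group_digits; infer_instance

-- ===== CLAIM (what is proved, stated in full; the proofs are below) =====
def Claim_equal_group_digits : Prop := ∀ (n : Int), Dom_group_digits n → Spec_group_digits n (group_digits n)

-- ===== LEMMAS AND PROOFS =====

-- the list of groups A's loop produces, right to left
def groupsA (s : List Char) (e : Nat) : List (List Char) :=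
  if 0 < e then
    groupsA s (e - 3) ++ [PySem.List.slice s (some ((e - 3 : Nat) : Int)) (some (e : Int))]
  else []
termination_by e
decreasing_by omega

-- the list of 3-chunks of s from index i up to e, left to right
def chunks (s : List Char) (i e : Nat) : List (List Char) :=
  if i < e then ((s.drop i).take 3) :: chunks s (i + 3) e else []
termination_by e - i
decreasing_by omega

theorem groupA_loop_eq (s : List Char) (e : Nat) (acc : List Char) :
    groupA_loop s e acc = ((groupsA s e).map wrapSpan).flatten ++ acc := by
  induction e using Nat.strong_induction_on generalizing acc with
  | _ e ih =>
    rw [groupA_loop, groupsA]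
    by_cases h : 0 < e
    · simp only [h, if_pos]
      rw [ih (e - 3) (by omega)]
      simp
    · simp [h]

theorem foldl_append_singleton {α β : Type} (f : α → β) (l : List α) (init : List β) :
    l.foldl (fun acc i => acc ++ [f i]) init = init ++ l.map f := by
  induction l generalizing init with
  | nil => simp
  | cons x xs ih => simp [List.foldl_cons, ih]

theorem pyRange3_nil (a b : Int) (h : b ≤ a) : PySem.List.pyRange a b 3 = [] := by
  rw [PySem.List.pyRange_of_pos a b (by norm_num)]
  simp [show ¬ a < b by omega]

theorem pyRange3_cons (a b : Int) (h : a < b) :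
    PySem.List.pyRange a b 3 = a :: PySem.List.pyRange (a + 3) b 3 := by
  rw [PySem.List.pyRange_of_pos a b (by norm_num),
      PySem.List.pyRange_of_pos (a + 3) b (by norm_num)]
  have hcnt : (if a < b then ((b - a + 3 - 1) / 3).toNat else 0)
      = (if a + 3 < b then ((b - (a + 3) + 3 - 1) / 3).toNat else 0) + 1 := by
    split_ifs <;> omega
  rw [hcnt, List.range_succ_eq_map]
  simp only [List.map_cons, List.map_map]
  congr 1
  · push_cast; ring
  · apply List.map_congr_left
    intro k _
    simp only [Function.comp_apply]
    push_cast
    ring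

theorem map_pyRange_eq_chunks (s : List Char) (i e : Nat) :
    (PySem.List.pyRange (i : Int) (e : Int) 3).map
        (fun j => PySem.List.slice s (some j) (some (j + 3))) = chunks s i e := by
  induction hk : e - i using Nat.strong_induction_on generalizing i with
  | _ k ih =>
    rw [chunks]
    by_cases h : i < e
    · rw [pyRange3_cons _ _ (by exact_mod_cast h)]
      simp only [List.map_cons, if_pos h]
      congr 1
      · have : ((i : Int) + 3) = ((i + 3 : Nat) : Int) := by push_cast; ring
        rw [this, PySem.List.slice_natCast]
        congr 1
        omega
      · have : ((i : Int) + 3) = ((i + 3 : Nat) : Int) := by push_cast; ring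
        rw [this]
        exact ih (e - (i + 3)) (by omega) (i + 3) rfl
    · rw [pyRange3_nil _ _ (by exact_mod_cast Nat.le_of_not_lt h)]
      simp [h]

theorem chunks_ext (s : List Char) (k : Nat) : ∀ i : Nat,
    chunks s i (i + 3 * k + 3) = chunks s i (i + 3 * k) ++ [(s.drop (i + 3 * k)).take 3] := by
  induction k with
  | zero =>
    intro i
    rw [chunks, if_pos (by omega), chunks, if_neg (by omega), chunks, if_neg (by omega)]
    simp
  | succ k ih =>
    intro i
    rw [chunks, if_pos (by omega)]
    conv_rhs => rw [chunks, if_pos (by omega)]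
    have h1 : i + 3 * (k + 1) + 3 = (i + 3) + 3 * k + 3 := by omega
    have h2 : i + 3 * (k + 1) = (i + 3) + 3 * k := by omega
    rw [h1, h2, ih (i + 3)]
    simp

theorem groupsA_eq (s : List Char) (e : Nat) :
    groupsA s e = (if e % 3 ≠ 0 then [s.take (e % 3)] else []) ++ chunks s (e % 3) e := by
  induction e using Nat.strong_induction_on with
  | _ e ih =>
    rw [groupsA]
    by_cases h : 0 < e
    · simp only [if_pos h]
      have hsl : PySem.List.slice s (some ((e - 3 : Nat) : Int)) (some ((e : Nat) : Int))
          = (s.drop (e - 3)).take (e - (e - 3)) := PySem.List.slice_natCast s (e - 3) e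
      by_cases h3 : e ≤ 3
      · -- groupsA (e-3) = groupsA 0 = []
        have he3 : e - 3 = 0 := by omega
        rw [he3] at hsl ⊢
        rw [groupsA, if_neg (by omega), hsl]
        simp only [List.drop_zero, Nat.sub_zero, List.nil_append]
        interval_cases e <;> simp [chunks]
      · rw [ih (e - 3) (by omega), hsl]
        have hm : (e - 3) % 3 = e % 3 := by omega
        rw [hm]
        have htk : e - (e - 3) = 3 := by omega
        rw [htk]
        obtain ⟨k, hk⟩ : ∃ k, e - 3 = e % 3 + 3 * k := ⟨(e - 3 - e % 3) / 3, by omega⟩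
        have hext := chunks_ext s k (e % 3)
        rw [← hk] at hext
        have he3' : e - 3 + 3 = e := by omega
        rw [he3'] at hext
        rw [List.append_assoc, ← hext]
    · have he : e = 0 := by omega
      subst he
      rw [chunks, if_neg (by omega)]
      simp

-- ===== VERDICT (by name: the statement is the Claim_ definition above) =====
theorem group_digits_spec : Claim_equal_group_digits := by
  intro n _
  unfold Spec_group_digits group_digits group_digits_alt
  simp only []
  congr 1
  rw [groupA_loop_eq, List.append_nil,
      foldl_append_singleton, map_pyRange_eq_chunks, groupsA_eq]
  congr 2
  by_cases h : (PySem.Int.toChars n).length % 3 = 0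
  · simp [h]
  · simp only [h, if_pos, ne_eq, not_false_iff]
    rw [PySem.List.slice_to_natCast]
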